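-- pv_equiv track=rewrite | github.com/tobiasleibrock/anlp-prompt-formatting | reformat/reformat/rules.py | _convert_roman
-- ===== SOURCE A (Python) =====
-- def _convert_roman(prompt: str, upper: bool = True) -> str:
--     roman_map = {
--         1: "I",
--         2: "II",
--         3: "III",
--         4: "IV",
--         5: "V",
--         6: "VI",
--         7: "VII",
--         8: "VIII",
--         9: "IX",
--         10: "X",
--     }
--     for num, roman in roman_map.items():
--         if not upper:
--             roman = roman.lower()
--         prompt = prompt.replace(str(num), roman)
--     return prompt
-- ===== SOURCE B (Python) =====
-- def _convert_roman(prompt: str, upper: bool = True) -> str: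
--     cmap = {"1": "I", "2": "II", "3": "III", "4": "IV", "5": "V",
--             "6": "VI", "7": "VII", "8": "VIII", "9": "IX"}
--     if not upper:
--         cmap = {k: v.lower() for k, v in cmap.items()}
--     return "".join(cmap.get(c, c) for c in prompt)
-- ===== Notes on version B (the rewrite author's own statement) =====
-- stated objective: idiomatic
-- what changed: Replaced ten whole-string str.replace passes by a single pass over the string with a digit-to-roman character table (cmap.get(c, c)); the original's '10' entry is provably dead because the '1' replace runs first.
import Mathlib
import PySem

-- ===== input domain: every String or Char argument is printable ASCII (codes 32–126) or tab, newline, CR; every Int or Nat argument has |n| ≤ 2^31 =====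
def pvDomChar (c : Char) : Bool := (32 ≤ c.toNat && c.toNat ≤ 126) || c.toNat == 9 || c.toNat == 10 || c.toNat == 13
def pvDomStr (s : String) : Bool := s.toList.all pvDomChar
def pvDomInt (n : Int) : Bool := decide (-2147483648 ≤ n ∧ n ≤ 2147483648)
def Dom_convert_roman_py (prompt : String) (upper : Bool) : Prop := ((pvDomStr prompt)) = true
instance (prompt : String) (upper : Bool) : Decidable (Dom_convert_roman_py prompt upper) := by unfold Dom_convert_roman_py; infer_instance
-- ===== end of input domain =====

-- B replaces A's ten whole-string str.replace passes by one pass over the string with a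
-- digit→roman character table (the '10' entry of A is dead: every '1' was already consumed
-- by the first replace); only the RETURN value is compared, neither version mutates anything.

-- ===== PORT A =====
-- literal transliteration of _convert_roman: a dict literal, then a for-loop over its items doing str.replace
def convert_roman_py (prompt : String) (upper : Bool) : String :=
  let roman_map : PySem.Dict Int String :=
    PySem.Dict.ofList [(1, "I"), (2, "II"), (3, "III"), (4, "IV"), (5, "V"),
                       (6, "VI"), (7, "VII"), (8, "VIII"), (9, "IX"), (10, "X")]
  (PySem.Dict.items roman_map).foldl
    (fun p kv =>
      let roman := if upper = false then PySem.Str.lower kv.2 else kv.2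
      PySem.Str.replace p (PySem.Int.toStr kv.1) roman)
    prompt

-- ===== PORT B =====
-- B's digit-character → roman table (the dict literal cmap in Source B)
def pvRomanDict : PySem.Dict Char String :=
  PySem.Dict.ofList [('1', "I"), ('2', "II"), ('3', "III"), ('4', "IV"), ('5', "V"),
                     ('6', "VI"), ('7', "VII"), ('8', "VIII"), ('9', "IX")]

-- literal transliteration of B: lowercase the table if needed, then ''.join(cmap.get(c, c) for c in prompt)
def convert_roman_py_alt (prompt : String) (upper : Bool) : String :=
  let cmap : PySem.Dict Char String :=
    if upper then pvRomanDict
    else PySem.Dict.ofList ((PySem.Dict.items pvRomanDict).map (fun kv => (kv.1, PySem.Str.lower kv.2)))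
  String.ofList (prompt.toList.flatMap (fun c => (PySem.Dict.getD cmap c (String.ofList [c])).toList))

-- ===== PRECONDITION & SPEC =====
def Spec_convert_roman_py (prompt : String) (upper : Bool) (out : String) : Prop := out = convert_roman_py_alt prompt upper
instance (prompt : String) (upper : Bool) (out : String) : Decidable (Spec_convert_roman_py prompt upper out) := by unfold Spec_convert_roman_py; infer_instance

-- ===== CLAIM (what is proved, stated in full; the proofs are below) =====
def Claim_equal_convert_roman_py : Prop := ∀ (prompt : String) (upper : Bool), Dom_convert_roman_py prompt upper → Spec_convert_roman_py prompt upper (convert_roman_py prompt upper)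

-- ===== LEMMAS AND PROOFS =====

-- Python s.replace(old, new) with a ONE-character old is a per-character substitution
theorem replace_go_single (d : Char) (new : List Char) :
    ∀ (fuel : Nat) (cs acc : List Char), cs.length ≤ fuel →
      PySem.Chars.replace.go [d] new fuel cs acc
        = acc.reverse ++ cs.flatMap (fun c => if c = d then new else [c]) := by
  intro fuel
  induction fuel with
  | zero => intro cs acc h; simp at h; subst h; simp [PySem.Chars.replace.go]
  | succ n ih =>
    intro cs acc h
    cases cs with
    | nil => simp [PySem.Chars.replace.go]
    | cons c t =>
      simp only [PySem.Chars.replace.go, List.isPrefixOf_cons₂]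
      by_cases hc : d = c
      · subst hc
        simp only [BEq.rfl, List.isPrefixOf_nil_left, Bool.true_and]
        rw [ih]
        · simp
        · simpa using Nat.le_of_succ_le_succ h
      · simp only [List.flatMap_cons]
        rw [if_neg (by simp [hc]), ih t (c :: acc) (by simpa using Nat.le_of_succ_le_succ h)]
        simp [Ne.symm hc]

-- s.replace(old, new) with a TWO-character old whose first character does not occur in s does nothing
theorem replace_go_two_notmem (d e : Char) (new : List Char) :
    ∀ (fuel : Nat) (cs acc : List Char), cs.length ≤ fuel → d ∉ cs →
      PySem.Chars.replace.go [d, e] new fuel cs acc = acc.reverse ++ cs := by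
  intro fuel
  induction fuel with
  | zero => intro cs acc h _; simp at h; subst h; simp [PySem.Chars.replace.go]
  | succ n ih =>
    intro cs acc h hm
    cases cs with
    | nil => simp [PySem.Chars.replace.go]
    | cons c t =>
      simp only [List.mem_cons, not_or] at hm
      have hne : ¬ (List.isPrefixOf [d, e] (c :: t) = true) := by
        simp [List.isPrefixOf_cons₂]
        intro hdc
        exact absurd hdc hm.1
      simp only [PySem.Chars.replace.go]
      rw [if_neg hne, ih t (c :: acc) (by simpa using Nat.le_of_succ_le_succ h) hm.2]
      simp

theorem replace_single (d : Char) (new cs : List Char) :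
    PySem.Chars.replace cs [d] new = cs.flatMap (fun c => if c = d then new else [c]) := by
  simp [PySem.Chars.replace, replace_go_single d new cs.length cs [] le_rfl]

theorem replace_two_notmem (d e : Char) (new cs : List Char) (hm : d ∉ cs) :
    PySem.Chars.replace cs [d, e] new = cs := by
  simp [PySem.Chars.replace, replace_go_two_notmem d e new cs.length cs [] le_rfl hm]

-- the combined per-character effect of A's chain of replaces
def pvSub (upper : Bool) (c : Char) : List Char :=
  if c = '1' then (if upper then ['I'] else ['i'])
  else if c = '2' then (if upper then ['I','I'] else ['i','i'])
  else if c = '3' then (if upper then ['I','I','I'] else ['i','i','i'])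
  else if c = '4' then (if upper then ['I','V'] else ['i','v'])
  else if c = '5' then (if upper then ['V'] else ['v'])
  else if c = '6' then (if upper then ['V','I'] else ['v','i'])
  else if c = '7' then (if upper then ['V','I','I'] else ['v','i','i'])
  else if c = '8' then (if upper then ['V','I','I','I'] else ['v','i','i','i'])
  else if c = '9' then (if upper then ['I','X'] else ['i','x'])
  else [c]

theorem pv_comp_list {g : Char → List Char} (hg : ∀ z, z ≠ '1' → '1' ∉ g z)
    {L : List Char} (hL : ∀ z ∈ L, z ≠ '1') : '1' ∉ List.flatMap g L := by
  intro hmem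
  obtain ⟨a, ha, hmem⟩ := List.mem_flatMap.mp hmem
  exact hg a (hL a ha) hmem

theorem pv_lift {g : Char → List Char} (hg : ∀ z, z ≠ '1' → '1' ∉ g z)
    (d : Char) (R : List Char) (hR : ∀ z ∈ R, z ≠ '1') :
    ∀ z, z ≠ '1' → '1' ∉ List.flatMap g (if z = d then R else [z]) := by
  intro z hz
  by_cases h : z = d
  · rw [if_pos h]; exact pv_comp_list hg hR
  · rw [if_neg h]; exact pv_comp_list hg (by simpa using hz)

set_option maxRecDepth 8192 in
theorem pv_chainA_true (p : String) :
    (convert_roman_py p true).toList = p.toList.flatMap (pvSub true) := by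
  have h : convert_roman_py p true = PySem.Str.replace (PySem.Str.replace (PySem.Str.replace (PySem.Str.replace (PySem.Str.replace (PySem.Str.replace (PySem.Str.replace (PySem.Str.replace (PySem.Str.replace (PySem.Str.replace (p) "1" "I") "2" "II") "3" "III") "4" "IV") "5" "V") "6" "VI") "7" "VII") "8" "VIII") "9" "IX") "10" "X" := rfl
  rw [h]
  simp only [PySem.Str.toList_replace]
  rw [show ("1".toList) = ['1'] from rfl, show ("2".toList) = ['2'] from rfl,
      show ("3".toList) = ['3'] from rfl, show ("4".toList) = ['4'] from rfl,
      show ("5".toList) = ['5'] from rfl, show ("6".toList) = ['6'] from rfl,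
      show ("7".toList) = ['7'] from rfl, show ("8".toList) = ['8'] from rfl,
      show ("9".toList) = ['9'] from rfl, show ("10".toList) = ['1','0'] from rfl]
  rw [replace_single, replace_single, replace_single, replace_single, replace_single,
      replace_single, replace_single, replace_single, replace_single]
  simp only [List.flatMap_assoc]
  rw [replace_two_notmem _ _ _ _ (by
    have hf9 : ∀ z : Char, z ≠ '1' → '1' ∉ (if z = '9' then "IX".toList else [z]) := by
      intro z hz
      by_cases h : z = '9'
      · subst h; decide
      · simp [h]; exact Ne.symm hz
    have hG8 := pv_lift hf9 '8' "VIII".toList (by simp)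
    have hG7 := pv_lift hG8 '7' "VII".toList (by simp)
    have hG6 := pv_lift hG7 '6' "VI".toList (by simp)
    have hG5 := pv_lift hG6 '5' "V".toList (by simp)
    have hG4 := pv_lift hG5 '4' "IV".toList (by simp)
    have hG3 := pv_lift hG4 '3' "III".toList (by simp)
    have hG2 := pv_lift hG3 '2' "II".toList (by simp)
    intro hmem
    obtain ⟨x, _, hmem⟩ := List.mem_flatMap.mp hmem
    by_cases hx : x = '1'
    · rw [if_pos hx] at hmem
      exact pv_comp_list hG2 (by simp) hmem
    · rw [if_neg hx] at hmem
      exact pv_comp_list hG2 (by simpa using hx) hmem)]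
  refine List.flatMap_congr fun c _ => ?_
  by_cases h1 : c = '1'; · subst h1; decide
  by_cases h2 : c = '2'; · subst h2; decide
  by_cases h3 : c = '3'; · subst h3; decide
  by_cases h4 : c = '4'; · subst h4; decide
  by_cases h5 : c = '5'; · subst h5; decide
  by_cases h6 : c = '6'; · subst h6; decide
  by_cases h7 : c = '7'; · subst h7; decide
  by_cases h8 : c = '8'; · subst h8; decide
  by_cases h9 : c = '9'; · subst h9; decide
  simp [pvSub, h1, h2, h3, h4, h5, h6, h7, h8, h9]

set_option maxRecDepth 8192 in
theorem pv_chainA_false (p : String) :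
    (convert_roman_py p false).toList = p.toList.flatMap (pvSub false) := by
  have h : convert_roman_py p false = PySem.Str.replace (PySem.Str.replace (PySem.Str.replace (PySem.Str.replace (PySem.Str.replace (PySem.Str.replace (PySem.Str.replace (PySem.Str.replace (PySem.Str.replace (PySem.Str.replace (p) "1" "i") "2" "ii") "3" "iii") "4" "iv") "5" "v") "6" "vi") "7" "vii") "8" "viii") "9" "ix") "10" "x" := rfl
  rw [h]
  simp only [PySem.Str.toList_replace]
  rw [show ("1".toList) = ['1'] from rfl, show ("2".toList) = ['2'] from rfl,
      show ("3".toList) = ['3'] from rfl, show ("4".toList) = ['4'] from rfl,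
      show ("5".toList) = ['5'] from rfl, show ("6".toList) = ['6'] from rfl,
      show ("7".toList) = ['7'] from rfl, show ("8".toList) = ['8'] from rfl,
      show ("9".toList) = ['9'] from rfl, show ("10".toList) = ['1','0'] from rfl]
  rw [replace_single, replace_single, replace_single, replace_single, replace_single,
      replace_single, replace_single, replace_single, replace_single]
  simp only [List.flatMap_assoc]
  rw [replace_two_notmem _ _ _ _ (by
    have hf9 : ∀ z : Char, z ≠ '1' → '1' ∉ (if z = '9' then "ix".toList else [z]) := by
      intro z hz
      by_cases h : z = '9'
      · subst h; decide
      · simp [h]; exact Ne.symm hz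
    have hG8 := pv_lift hf9 '8' "viii".toList (by simp)
    have hG7 := pv_lift hG8 '7' "vii".toList (by simp)
    have hG6 := pv_lift hG7 '6' "vi".toList (by simp)
    have hG5 := pv_lift hG6 '5' "v".toList (by simp)
    have hG4 := pv_lift hG5 '4' "iv".toList (by simp)
    have hG3 := pv_lift hG4 '3' "iii".toList (by simp)
    have hG2 := pv_lift hG3 '2' "ii".toList (by simp)
    intro hmem
    obtain ⟨x, _, hmem⟩ := List.mem_flatMap.mp hmem
    by_cases hx : x = '1'
    · rw [if_pos hx] at hmem
      exact pv_comp_list hG2 (by simp) hmem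
    · rw [if_neg hx] at hmem
      exact pv_comp_list hG2 (by simpa using hx) hmem)]
  refine List.flatMap_congr fun c _ => ?_
  by_cases h1 : c = '1'; · subst h1; decide
  by_cases h2 : c = '2'; · subst h2; decide
  by_cases h3 : c = '3'; · subst h3; decide
  by_cases h4 : c = '4'; · subst h4; decide
  by_cases h5 : c = '5'; · subst h5; decide
  by_cases h6 : c = '6'; · subst h6; decide
  by_cases h7 : c = '7'; · subst h7; decide
  by_cases h8 : c = '8'; · subst h8; decide
  by_cases h9 : c = '9'; · subst h9; decide
  simp [pvSub, h1, h2, h3, h4, h5, h6, h7, h8, h9]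

-- B's single pass, per character
theorem pv_B_toList (p : String) (u : Bool) :
    (convert_roman_py_alt p u).toList = p.toList.flatMap (pvSub u) := by
  simp only [convert_roman_py_alt, String.toList_ofList]
  refine List.flatMap_congr fun c _ => ?_
  by_cases h1 : c = '1'; · subst h1; cases u <;> decide
  by_cases h2 : c = '2'; · subst h2; cases u <;> decide
  by_cases h3 : c = '3'; · subst h3; cases u <;> decide
  by_cases h4 : c = '4'; · subst h4; cases u <;> decide
  by_cases h5 : c = '5'; · subst h5; cases u <;> decide
  by_cases h6 : c = '6'; · subst h6; cases u <;> decide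
  by_cases h7 : c = '7'; · subst h7; cases u <;> decide
  by_cases h8 : c = '8'; · subst h8; cases u <;> decide
  by_cases h9 : c = '9'; · subst h9; cases u <;> decide
  cases u <;>
    simp [pvSub, pvRomanDict, PySem.Dict.getD, PySem.Dict.get?, PySem.Dict.ofList, PySem.Dict.update,
          PySem.Dict.insert, PySem.Dict.contains, PySem.Dict.empty, List.find?, PySem.Str.lower,
          beq_eq_false_iff_ne.mpr (Ne.symm h1), beq_eq_false_iff_ne.mpr (Ne.symm h2),
          beq_eq_false_iff_ne.mpr (Ne.symm h3), beq_eq_false_iff_ne.mpr (Ne.symm h4),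
          beq_eq_false_iff_ne.mpr (Ne.symm h5), beq_eq_false_iff_ne.mpr (Ne.symm h6),
          beq_eq_false_iff_ne.mpr (Ne.symm h7), beq_eq_false_iff_ne.mpr (Ne.symm h8),
          beq_eq_false_iff_ne.mpr (Ne.symm h9), h1, h2, h3, h4, h5, h6, h7, h8, h9]

-- ===== VERDICT (by name: the statement is the Claim_ definition above) =====
theorem convert_roman_py_spec : Claim_equal_convert_roman_py := by
  intro prompt upper _
  unfold Spec_convert_roman_py
  have hA : (convert_roman_py prompt upper).toList = prompt.toList.flatMap (pvSub upper) := by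
    cases upper
    · exact pv_chainA_false prompt
    · exact pv_chainA_true prompt
  have hB := pv_B_toList prompt upper
  have := hA.trans hB.symm
  calc convert_roman_py prompt upper
      = String.ofList (convert_roman_py prompt upper).toList := by rw [String.ofList_toList]
    _ = String.ofList (convert_roman_py_alt prompt upper).toList := by rw [this]
    _ = convert_roman_py_alt prompt upper := by rw [String.ofList_toList]
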